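-- pv_equiv track=rewrite | github.com/sorodocosmin/python | Lab_2/lab_2.py | ex_5
-- ===== SOURCE A (Python) =====
-- def ex_5(matrix: list) -> list | None:
--     """
--     We consider that the param matrix will have the form of a matrix
--     :param matrix:
--     :return: the matrix obtained by replacing all the elements under the main diagonal with 0 (zero).
--     or None if it isn't a square matrix
--     """
--     size_line_1 = len(matrix[0])
--     nr_lines = len(matrix)
--
--     if nr_lines != size_line_1:
--         return None
--
--     for lines in matrix:
--         if len(lines) != size_line_1:
--             return None
--
--     # we create and return a new matrix, as after this function is called the matrix param won't be changed
--     new_matrix = []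
--     for i in range(size_line_1):
--         line_new_matrix = []
--         for j in range(size_line_1):
--             if i > j:
--                 line_new_matrix += [0]
--             else:
--                 line_new_matrix += [matrix[i][j]]
--         new_matrix += [line_new_matrix]
--
--     return new_matrix
-- ===== SOURCE B (Python) =====
-- def ex_5(matrix: list) -> list | None:
--     n = len(matrix)
--     for row in matrix:
--         if len(row) != n:
--             return None
--     return [[0] * i + row[i:] for i, row in enumerate(matrix)]
-- ===== Notes on version B (the rewrite author's own statement) =====
-- stated objective: simpler
-- what changed: Replaces the nested i/j per-cell loop with a single row comprehension building each result row as [0]*i + row[i:] (bulk C-level replicate/slice instead of per-cell Python branching), and folds the square/row-length validation into one check of every row length against len(matrix).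
import Mathlib
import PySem

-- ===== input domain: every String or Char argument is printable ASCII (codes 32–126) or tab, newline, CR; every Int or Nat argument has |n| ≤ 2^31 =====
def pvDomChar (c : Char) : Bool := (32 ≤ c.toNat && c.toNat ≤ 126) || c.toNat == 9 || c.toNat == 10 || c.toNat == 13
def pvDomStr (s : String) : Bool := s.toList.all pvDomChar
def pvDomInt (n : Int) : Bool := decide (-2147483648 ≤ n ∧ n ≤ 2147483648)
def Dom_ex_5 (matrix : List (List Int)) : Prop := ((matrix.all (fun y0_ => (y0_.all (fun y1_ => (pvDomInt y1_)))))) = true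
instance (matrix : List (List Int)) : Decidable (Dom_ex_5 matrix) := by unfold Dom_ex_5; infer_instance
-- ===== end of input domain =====

-- B replaces A's nested per-cell loop by a single comprehension building each row as [0]*i + row[i:],
-- with one validation pass against len(matrix) (objective: simpler). Pre_ excludes only the empty
-- matrix, where A raises IndexError reading matrix[0] and B returns [].


-- ===== PORT A =====
-- A's inner j-loop: line_new_matrix built cell by cell, 0 below the diagonal (i > j),
-- matrix[i][j] otherwise (always in range once validation passed; pyGetD is exact there).
def ex5Line (matrix : List (List Int)) (sizeLine1 : Int) (i : Int) : List Int :=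
  (PySem.List.pyRange 0 sizeLine1 1).foldl (fun line j =>
    if i > j then line ++ [0]
    else line ++ [PySem.List.pyGetD (PySem.List.pyGetD matrix i []) j 0]) []

def ex_5 (matrix : List (List Int)) : Option (List (List Int)) :=
  match PySem.List.pyGet? matrix 0 with
  | none => none
  | some row0 =>
    if (matrix.length : Int) ≠ (row0.length : Int) then none
    else if matrix.any (fun lines => (lines.length : Int) ≠ (row0.length : Int)) then none
    else
      some ((PySem.List.pyRange 0 (row0.length : Int) 1).foldl (fun newMatrix i =>
        newMatrix ++ [ex5Line matrix (row0.length : Int) i]) [])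

def ex_5_alt (matrix : List (List Int)) : Option (List (List Int)) :=
  if matrix.any (fun row => (row.length : Int) ≠ (matrix.length : Int)) then none
  else
    some ((PySem.List.enumerate matrix 0).map (fun p =>
      List.replicate p.1.toNat 0 ++ PySem.List.slice p.2 (some p.1) none))

-- ===== PRECONDITION & SPEC =====
-- Pre_ excludes exactly the empty matrix, on which A raises IndexError reading matrix[0].
def Pre_ex_5 (matrix : List (List Int)) : Prop := matrix ≠ []
instance (matrix : List (List Int)) : Decidable (Pre_ex_5 matrix) := by unfold Pre_ex_5; infer_instance
def pvWitness_ex_5 : List (List Int) := [[1, 2], [3, 4]]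

def Spec_ex_5 (matrix : List (List Int)) (out : Option (List (List Int))) : Prop := out = ex_5_alt matrix
instance (matrix : List (List Int)) (out : Option (List (List Int))) : Decidable (Spec_ex_5 matrix out) := by unfold Spec_ex_5; infer_instance

-- ===== CLAIM (what is proved, stated in full; the proofs are below) =====
def Claim_equal_ex_5 : Prop := ∀ (matrix : List (List Int)), Dom_ex_5 matrix → Pre_ex_5 matrix → Spec_ex_5 matrix (ex_5 matrix)

-- ===== LEMMAS AND PROOFS =====

theorem row_eq (matrix : List (List Int)) (n i : Nat)
    (hn : matrix.length = n) (hi : i < n)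
    (hrow : ∀ r ∈ matrix, r.length = n) :
    ((List.range n).map (fun j : Nat =>
        if (i : Int) > (j : Int) then (0 : Int)
        else PySem.List.pyGetD (PySem.List.pyGetD matrix (i : Int) []) (j : Int) 0))
      = List.replicate i 0 ++ (matrix[i]'(by omega)).drop i := by
  have hlen : (matrix[i]'(by omega)).length = n := hrow _ (List.getElem_mem (by omega))
  have hget : PySem.List.pyGetD matrix (i : Int) [] = matrix[i]'(by omega) := by
    rw [PySem.List.pyGetD_natCast, List.getD_eq_getElem?_getD, List.getElem?_eq_getElem (by omega)]
    rfl
  apply List.ext_getElem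
  · simp [hlen]; omega
  · intro k hk1 hk2
    simp only [List.getElem_map, List.getElem_range, hget]
    have hkn : k < n := by simpa using hk1
    by_cases hki : k < i
    · rw [List.getElem_append_left (by simp [hki])]
      simp [hki, List.getElem_replicate]
    · rw [List.getElem_append_right (by simp; omega)]
      have hik : ¬ ((i : Int) > (k : Int)) := by omega
      simp only [hik, List.length_replicate, List.getElem_drop]
      rw [PySem.List.pyGetD_natCast, List.getD_eq_getElem?_getD,
        List.getElem?_eq_getElem (by omega)]
      simp only [Option.getD_some, Nat.add_sub_cancel' (Nat.le_of_not_lt hki)]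
      simp

theorem innerRow (L : List Int) (i : Int) (M : List (List Int)) (acc : List Int) :
    L.foldl (fun line j => if i > j then line ++ [0]
        else line ++ [PySem.List.pyGetD (PySem.List.pyGetD M i []) j 0]) acc
      = acc ++ L.map (fun j => if i > j then 0
        else PySem.List.pyGetD (PySem.List.pyGetD M i []) j 0) := by
  induction L generalizing acc with
  | nil => simp
  | cons x xs ih =>
    simp only [List.foldl_cons, List.map_cons, ih]
    split <;> simp

theorem main_eq : ∀ (matrix : List (List Int)), matrix ≠ [] → ex_5 matrix = ex_5_alt matrix := by
  intro matrix hpre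
  obtain ⟨r0, rest, rfl⟩ : ∃ r0 rest, matrix = r0 :: rest := by
    cases matrix with
    | nil => exact absurd rfl hpre
    | cons a l => exact ⟨a, l, rfl⟩
  have hget0 : PySem.List.pyGet? (r0 :: rest) 0 = some r0 := by
    simp [PySem.List.pyGet?, PySem.List.pyIdx?]
  have hred : ex_5 (r0 :: rest) =
      (if (((r0 :: rest).length : Int)) ≠ ((r0.length : Int)) then none
       else if (r0 :: rest).any (fun lines => (lines.length : Int) ≠ (r0.length : Int)) then none
       else some ((PySem.List.pyRange 0 (r0.length : Int) 1).foldl (fun newMatrix i =>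
         newMatrix ++ [ex5Line (r0 :: rest) (r0.length : Int) i]) [])) := by
    unfold ex_5
    rw [hget0]
  rw [hred]
  unfold ex_5_alt
  by_cases hB : (r0 :: rest).any (fun row => (row.length : Int) ≠ ((r0 :: rest).length : Int))
  · rw [if_pos hB]
    by_cases h1 : (((r0 :: rest).length : Int)) ≠ ((r0.length : Int))
    · rw [if_pos h1]
    · rw [if_neg h1]
      push_neg at h1
      simp only [List.any_eq_true, decide_eq_true_eq] at hB
      obtain ⟨row, hrm, hrl⟩ := hB
      have h2 : (r0 :: rest).any (fun lines => (lines.length : Int) ≠ (r0.length : Int)) := by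
        simp only [List.any_eq_true, decide_eq_true_eq]
        exact ⟨row, hrm, by omega⟩
      rw [if_pos h2]
  · have hall : ∀ r ∈ (r0 :: rest), r.length = (r0 :: rest).length := by
      intro r hr
      simp only [List.any_eq_true, decide_eq_true_eq, not_exists] at hB
      have h := hB r
      simp only [hr, true_and, not_not] at h
      exact_mod_cast h
    have h0 : r0.length = (r0 :: rest).length := hall r0 (by simp)
    have hc1 : ¬ ((((r0 :: rest).length : Int)) ≠ ((r0.length : Int))) := by
      push_neg; exact_mod_cast h0.symm
    have hc2 : ¬ ((r0 :: rest).any (fun lines => (lines.length : Int) ≠ (r0.length : Int)) = true) := by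
      simp only [List.any_eq_true, decide_eq_true_eq, not_exists, not_and, not_not]
      intro r hr
      exact_mod_cast (hall r hr).trans h0.symm
    rw [if_neg hc1, if_neg hc2, if_neg hB]
    congr 1
    unfold ex5Line
    simp only [innerRow, PySem.List.foldl_append_singleton_eq_map, List.nil_append]
    have hcast : ((r0.length : Int)) = (((r0 :: rest).length : Nat) : Int) := by exact_mod_cast h0
    rw [hcast, PySem.List.pyRange_zero_nat, List.map_map]
    apply List.ext_getElem
    · simp [PySem.List.length_enumerate]
    · intro i hi1 hi2
      have hin : i < (r0 :: rest).length := by simpa using hi1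
      simp only [List.getElem_map, List.getElem_range, Function.comp_def,
        PySem.List.getElem_enumerate]
      rw [List.map_map]
      simp only [Function.comp_def]
      have := row_eq (r0 :: rest) (r0 :: rest).length i rfl hin hall
      rw [this]
      simp [PySem.List.slice_from_natCast]

-- ===== VERDICT (by name: the statement is the Claim_ definition above) =====
theorem ex_5_spec : Claim_equal_ex_5 := by
  intro matrix _ hpre
  unfold Spec_ex_5
  exact main_eq matrix hpre
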